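-- pv_equiv track=rewrite | github.com/kimmingul/NanumSlide | src/skills/visualize_skill.py | _determine_visualization_type
-- ===== SOURCE A (Python) =====
-- from typing import Dict, Any, List, Optional
--
-- def _determine_visualization_type(data: Dict) -> str:
--     """시각화 유형 자동 결정"""
--     values = data.get("values", [])
--
--     if not values:
--         return "bar"
--
--     # 비율 데이터 (합이 100에 가까움)
--     total = sum(values)
--     if 95 <= total <= 105:
--         return "pie"
--
--     # 시계열 데이터 (증가/감소 추세)
--     if len(values) >= 4:
--         diffs = [values[i+1] - values[i] for i in range(len(values)-1)]
--         if all(d >= 0 for d in diffs) or all(d <= 0 for d in diffs):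
--             return "line"
--
--     # 기본값
--     return "bar"
-- ===== SOURCE B (Python) =====
-- def _determine_visualization_type(data):
--     """Chart type from value statistics: sort-comparison monotonicity test instead of a diff scan."""
--     values = data.get("values", [])
--     if not values:
--         return "bar"
--     if 95 <= sum(values) <= 105:
--         return "pie"
--     if len(values) >= 4 and values in (sorted(values), sorted(values, reverse=True)):
--         return "line"
--     return "bar"
-- ===== Notes on version B (the rewrite author's own statement) =====
-- stated objective: idiomatic
-- what changed: The consecutive-difference list and its all(d>=0)/all(d<=0) scan are replaced by comparing the list with its sorted and reverse-sorted copies to detect monotonicity.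
import Mathlib
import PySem

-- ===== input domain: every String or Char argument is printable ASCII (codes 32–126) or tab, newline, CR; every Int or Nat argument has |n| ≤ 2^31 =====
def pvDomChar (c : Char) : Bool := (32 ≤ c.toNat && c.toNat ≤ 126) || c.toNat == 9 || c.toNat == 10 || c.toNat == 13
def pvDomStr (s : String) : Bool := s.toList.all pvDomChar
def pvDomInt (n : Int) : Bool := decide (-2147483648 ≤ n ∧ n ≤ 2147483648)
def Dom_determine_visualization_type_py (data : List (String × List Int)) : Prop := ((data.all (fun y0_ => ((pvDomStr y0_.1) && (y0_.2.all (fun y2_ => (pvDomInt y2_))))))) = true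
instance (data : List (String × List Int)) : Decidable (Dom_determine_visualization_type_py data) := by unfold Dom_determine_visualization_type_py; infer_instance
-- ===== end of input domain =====

-- B replaces A's consecutive-difference scan by comparing the list to its sorted / reverse-sorted
-- copy (idiomatic monotonicity test); return values agree on every input.

-- ===== PORT A =====
def determine_visualization_type_py (data : List (String × List Int)) : String :=
  let values := (PySem.Dict.mk data).getD "values" []
  if values = [] then "bar"
  else
    let total := values.sum
    if 95 ≤ total ∧ total ≤ 105 then "pie"
    else if 4 ≤ values.length then
      let diffs := (PySem.List.pyRange 0 ((values.length : Int) - 1) 1).map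
        (fun i => PySem.List.pyGetD values (i + 1) 0 - PySem.List.pyGetD values i 0)
      if (diffs.all fun d => decide (0 ≤ d)) || (diffs.all fun d => decide (d ≤ 0)) then "line"
      else "bar"
    else "bar"

-- ===== PORT B =====
def determine_visualization_type_py_alt (data : List (String × List Int)) : String :=
  let values := (PySem.Dict.mk data).getD "values" []
  if values = [] then "bar"
  else if 95 ≤ values.sum ∧ values.sum ≤ 105 then "pie"
  else if 4 ≤ values.length ∧
      (values = PySem.List.sorted values (fun x => x) false ∨
       values = PySem.List.sorted values (fun x => x) true) then "line"
  else "bar"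

-- ===== PRECONDITION & SPEC =====
def Spec_determine_visualization_type_py (data : List (String × List Int)) (out : String) : Prop := out = determine_visualization_type_py_alt data
instance (data : List (String × List Int)) (out : String) : Decidable (Spec_determine_visualization_type_py data out) := by unfold Spec_determine_visualization_type_py; infer_instance

-- ===== CLAIM (what is proved, stated in full; the proofs are below) =====
def Claim_equal_determine_visualization_type_py : Prop := ∀ (data : List (String × List Int)), Dom_determine_visualization_type_py data → Spec_determine_visualization_type_py data (determine_visualization_type_py data)

-- ===== LEMMAS AND PROOFS =====

-- the diff list is nonnegative exactly when the list is an adjacent-≤ chain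
lemma diffs_nonneg_iff_isChain (values : List Int) :
    (((PySem.List.pyRange 0 ((values.length : Int) - 1) 1).map
        (fun i => PySem.List.pyGetD values (i + 1) 0 - PySem.List.pyGetD values i 0)).all
      fun d => decide (0 ≤ d)) = true ↔ List.IsChain (· ≤ ·) values := by
  rw [List.isChain_iff_getElem]
  simp only [List.all_eq_true, List.mem_map, PySem.List.mem_pyRange_one, decide_eq_true_eq]
  constructor
  · intro h i hi
    have h0 : (0 : Int) ≤ (i : Int) := Int.natCast_nonneg i
    have h1 : (i : Int) < (values.length : Int) - 1 := by omega
    have := h _ ⟨(i : Int), ⟨h0, h1⟩, rfl⟩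
    rw [PySem.List.pyGetD_eq_getElem values (i := (i : Int) + 1) 0 (by omega) (by omega),
        PySem.List.pyGetD_eq_getElem values (i := (i : Int)) 0 (by omega) (by omega)] at this
    simp only [Int.toNat_natCast] at this
    have hcast : ((i : Int) + 1).toNat = i + 1 := by omega
    simp only [hcast] at this
    omega
  · intro h d hd
    obtain ⟨i, ⟨h0, h1⟩, rfl⟩ := hd
    rw [PySem.List.pyGetD_eq_getElem values (i := i + 1) 0 (by omega) (by omega),
        PySem.List.pyGetD_eq_getElem values (i := i) 0 (by omega) (by omega)]
    have hi : i.toNat + 1 < values.length := by omega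
    have := h i.toNat hi
    have hcast : (i + 1).toNat = i.toNat + 1 := by omega
    simp only [hcast]
    omega

lemma diffs_nonpos_iff_isChain (values : List Int) :
    (((PySem.List.pyRange 0 ((values.length : Int) - 1) 1).map
        (fun i => PySem.List.pyGetD values (i + 1) 0 - PySem.List.pyGetD values i 0)).all
      fun d => decide (d ≤ 0)) = true ↔ List.IsChain (fun a b : Int => b ≤ a) values := by
  rw [List.isChain_iff_getElem]
  simp only [List.all_eq_true, List.mem_map, PySem.List.mem_pyRange_one, decide_eq_true_eq]
  constructor
  · intro h i hi
    have h0 : (0 : Int) ≤ (i : Int) := Int.natCast_nonneg i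
    have h1 : (i : Int) < (values.length : Int) - 1 := by omega
    have := h _ ⟨(i : Int), ⟨h0, h1⟩, rfl⟩
    rw [PySem.List.pyGetD_eq_getElem values (i := (i : Int) + 1) 0 (by omega) (by omega),
        PySem.List.pyGetD_eq_getElem values (i := (i : Int)) 0 (by omega) (by omega)] at this
    simp only [Int.toNat_natCast] at this
    have hcast : ((i : Int) + 1).toNat = i + 1 := by omega
    simp only [hcast] at this
    omega
  · intro h d hd
    obtain ⟨i, ⟨h0, h1⟩, rfl⟩ := hd
    rw [PySem.List.pyGetD_eq_getElem values (i := i + 1) 0 (by omega) (by omega),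
        PySem.List.pyGetD_eq_getElem values (i := i) 0 (by omega) (by omega)]
    have hi : i.toNat + 1 < values.length := by omega
    have := h i.toNat hi
    have hcast : (i + 1).toNat = i.toNat + 1 := by omega
    simp only [hcast]
    omega

-- adjacent-≤ chain ↔ the list equals sorted(values)
lemma isChain_iff_eq_sorted (values : List Int) :
    List.IsChain (· ≤ ·) values ↔ values = PySem.List.sorted values (fun x => x) false := by
  constructor
  · intro h
    have hp : List.Pairwise (fun a b : Int => a ≤ b) values := List.isChain_iff_pairwise.mp h
    exact (PySem.List.sorted_eq_self_of_pairwise values (fun x => x) hp).symm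
  · intro h
    have hp0 := PySem.List.sorted_pairwise values (fun x => x)
    rw [← h] at hp0
    have hp : List.Pairwise (fun a b : Int => a ≤ b) values := by simpa using hp0
    exact List.isChain_iff_pairwise.mpr hp

lemma isChain_ge_iff_eq_sorted_rev (values : List Int) :
    List.IsChain (fun a b : Int => b ≤ a) values ↔
      values = PySem.List.sorted values (fun x => x) true := by
  have htrans : Trans (fun a b : Int => b ≤ a) (fun a b : Int => b ≤ a) (fun a b : Int => b ≤ a) :=
    ⟨fun h1 h2 => le_trans h2 h1⟩
  constructor
  · intro h
    have hp : List.Pairwise (fun a b : Int => b ≤ a) values :=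
      (@List.isChain_iff_pairwise _ _ _ htrans).mp h
    exact (PySem.List.sorted_rev_eq_self_of_pairwise values (fun x => x) hp).symm
  · intro h
    have hp0 := PySem.List.sorted_pairwise_rev values (fun x => x)
    rw [← h] at hp0
    have hp : List.Pairwise (fun a b : Int => b ≤ a) values := by simpa using hp0
    exact (@List.isChain_iff_pairwise _ _ _ htrans).mpr hp

-- ===== VERDICT (by name: the statement is the Claim_ definition above) =====
theorem determine_visualization_type_py_spec : Claim_equal_determine_visualization_type_py := by
  intro data _
  unfold Spec_determine_visualization_type_py determine_visualization_type_py
    determine_visualization_type_py_alt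
  set values := (PySem.Dict.mk data).getD "values" [] with hv
  by_cases hnil : values = []
  · simp [hnil]
  · simp only [if_neg hnil]
    by_cases hpie : 95 ≤ values.sum ∧ values.sum ≤ 105
    · simp [hpie]
    · simp only [if_neg hpie]
      by_cases hlen : 4 ≤ values.length
      · simp only [if_pos hlen]
        by_cases hmono :
            (((PySem.List.pyRange 0 ((values.length : Int) - 1) 1).map
                (fun i => PySem.List.pyGetD values (i + 1) 0 - PySem.List.pyGetD values i 0)).all
              fun d => decide (0 ≤ d)) = true ∨
            (((PySem.List.pyRange 0 ((values.length : Int) - 1) 1).map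
                (fun i => PySem.List.pyGetD values (i + 1) 0 - PySem.List.pyGetD values i 0)).all
              fun d => decide (d ≤ 0)) = true
        · have hb : 4 ≤ values.length ∧
              (values = PySem.List.sorted values (fun x => x) false ∨
               values = PySem.List.sorted values (fun x => x) true) := by
            refine ⟨hlen, ?_⟩
            rcases hmono with h | h
            · exact Or.inl ((isChain_iff_eq_sorted values).mp
                ((diffs_nonneg_iff_isChain values).mp h))
            · exact Or.inr ((isChain_ge_iff_eq_sorted_rev values).mp
                ((diffs_nonpos_iff_isChain values).mp h))
          rw [if_pos hb, if_pos (Bool.or_eq_true _ _ |>.mpr hmono)]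
        · have hb : ¬ (4 ≤ values.length ∧
              (values = PySem.List.sorted values (fun x => x) false ∨
               values = PySem.List.sorted values (fun x => x) true)) := by
            rintro ⟨-, h | h⟩
            · exact hmono (Or.inl ((diffs_nonneg_iff_isChain values).mpr
                ((isChain_iff_eq_sorted values).mpr h)))
            · exact hmono (Or.inr ((diffs_nonpos_iff_isChain values).mpr
                ((isChain_ge_iff_eq_sorted_rev values).mpr h)))
          rw [if_neg hb, if_neg (by simpa [Bool.or_eq_true] using hmono)]
      · have hb : ¬ (4 ≤ values.length ∧
            (values = PySem.List.sorted values (fun x => x) false ∨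
             values = PySem.List.sorted values (fun x => x) true)) := fun h => hlen h.1
        rw [if_neg hlen, if_neg hb]
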